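-- pv_equiv track=rewrite | github.com/ddururiiiiiii/codingTest_python | .idea/codingTest_beginning/day13.py | solution
-- ===== SOURCE A (Python) =====
-- def solution(str_list):
--     answer = []
--     for i in range(len(str_list)):
--         if str_list[i]=='l':
--             return str_list[:i]
--         elif str_list[i]=='r':
--             return str_list[i+1:]
--
--     return answer
-- ===== SOURCE B (Python) =====
-- def solution(str_list):
--     n = len(str_list)
--     try:
--         li = str_list.index('l')
--     except ValueError:
--         li = n
--     try:
--         ri = str_list.index('r')
--     except ValueError:
--         ri = n
--     if li == n and ri == n:
--         return []
--     if li < ri: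
--         return str_list[:li]
--     return str_list[ri + 1:]
-- ===== Notes on version B (the rewrite author's own statement) =====
-- stated objective: alternative
-- what changed: Replaces the single short-circuiting index scan with an up-front computation of the first positions of 'l' and 'r' (missing = length), then one comparison decides which slice to return.
import Mathlib
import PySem

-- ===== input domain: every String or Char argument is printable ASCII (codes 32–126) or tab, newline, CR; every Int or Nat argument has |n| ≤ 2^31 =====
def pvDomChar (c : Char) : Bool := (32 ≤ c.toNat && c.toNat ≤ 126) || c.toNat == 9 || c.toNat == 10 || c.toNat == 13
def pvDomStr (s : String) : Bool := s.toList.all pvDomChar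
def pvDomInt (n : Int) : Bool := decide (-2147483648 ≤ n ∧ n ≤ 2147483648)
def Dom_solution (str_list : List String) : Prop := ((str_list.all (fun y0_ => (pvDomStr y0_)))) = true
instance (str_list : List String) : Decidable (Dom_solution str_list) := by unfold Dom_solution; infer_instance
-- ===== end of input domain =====

-- B is an alternative decomposition of the same O(n) task: find the first positions of "l" and "r" up front, then one comparison picks the slice.

-- ===== PORT A =====
-- the index loop 'for i in range(len(str_list))' becomes recursion on the index i
def solutionGo (str_list : List String) (i : Nat) : List String :=
  if h : i < str_list.length then
    if str_list[i] = "l" then PySem.List.slice str_list none (some (i : Int))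
    else if str_list[i] = "r" then PySem.List.slice str_list (some ((i : Int) + 1)) none
    else solutionGo str_list (i + 1)
  else []
termination_by str_list.length - i

def solution (str_list : List String) : List String :=
  solutionGo str_list 0

-- ===== PORT B =====
def solution_alt (str_list : List String) : List String :=
  let n := str_list.length
  let li := (PySem.List.index? str_list "l").getD n
  let ri := (PySem.List.index? str_list "r").getD n
  if li = n ∧ ri = n then []
  else if li < ri then PySem.List.slice str_list none (some (li : Int))
  else PySem.List.slice str_list (some ((ri : Int) + 1)) none

-- ===== PRECONDITION & SPEC =====
def Spec_solution (str_list : List String) (out : List String) : Prop := out = solution_alt str_list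
instance (str_list : List String) (out : List String) : Decidable (Spec_solution str_list out) := by unfold Spec_solution; infer_instance

-- ===== CLAIM (what is proved, stated in full; the proofs are below) =====
def Claim_equal_solution : Prop := ∀ (str_list : List String), Dom_solution str_list → Spec_solution str_list (solution str_list)

-- ===== LEMMAS AND PROOFS =====

-- what A's loop computes from index i onward, phrased through the first occurrences in the remaining suffix
def solutionGoSpec (xs : List String) (i : Nat) : List String :=
  match PySem.List.index? (xs.drop i) "l", PySem.List.index? (xs.drop i) "r" with
  | none, none => []
  | some a, none => xs.take (i + a)
  | none, some b => xs.drop (i + b + 1)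
  | some a, some b => if a < b then xs.take (i + a) else xs.drop (i + b + 1)

lemma solutionGo_eq_spec (xs : List String) :
    ∀ (k i : Nat), xs.length ≤ i + k → solutionGo xs i = solutionGoSpec xs i := by
  intro k
  induction k with
  | zero =>
    intro i hik
    have h : ¬ i < xs.length := by omega
    have hd : xs.drop i = ([] : List String) := List.drop_eq_nil_of_le (by omega)
    rw [solutionGo, dif_neg h, solutionGoSpec, hd]
    simp [PySem.List.index?_eq_idxOf?]
  | succ k ih =>
    intro i hik
    by_cases h : i < xs.length
    · have hd : xs.drop i = xs[i] :: xs.drop (i+1) := List.drop_eq_getElem_cons h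
      rw [solutionGo, dif_pos h]
      by_cases hl : xs[i] = "l"
      · have h1 : PySem.List.index? (xs.drop i) "l" = some 0 := by
          rw [hd, hl]; exact PySem.List.index?_cons_self _ _
        have h2 : PySem.List.index? (xs.drop i) "r"
            = (PySem.List.index? (xs.drop (i+1)) "r").map (· + 1) := by
          rw [hd, hl]; exact PySem.List.index?_cons_of_ne _ (by decide)
        rw [if_pos hl, solutionGoSpec, h1, h2, PySem.List.slice_to_natCast]
        cases PySem.List.index? (xs.drop (i+1)) "r" <;> simp
      · by_cases hr : xs[i] = "r"
        · have h1 : PySem.List.index? (xs.drop i) "r" = some 0 := by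
            rw [hd, hr]; exact PySem.List.index?_cons_self _ _
          have h2 : PySem.List.index? (xs.drop i) "l"
              = (PySem.List.index? (xs.drop (i+1)) "l").map (· + 1) := by
            rw [hd, hr]; exact PySem.List.index?_cons_of_ne _ (by decide)
          have hc : ((i : Int) + 1) = ((i + 1 : Nat) : Int) := by push_cast; ring
          rw [if_neg hl, if_pos hr, solutionGoSpec, h1, h2, hc, PySem.List.slice_from_natCast]
          cases PySem.List.index? (xs.drop (i+1)) "l" <;> simp
        · have h1 : PySem.List.index? (xs.drop i) "l"
              = (PySem.List.index? (xs.drop (i+1)) "l").map (· + 1) := by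
            rw [hd]; exact PySem.List.index?_cons_of_ne _ hl
          have h2 : PySem.List.index? (xs.drop i) "r"
              = (PySem.List.index? (xs.drop (i+1)) "r").map (· + 1) := by
            rw [hd]; exact PySem.List.index?_cons_of_ne _ hr
          rw [if_neg hl, if_neg hr, ih (i+1) (by omega), solutionGoSpec, solutionGoSpec, h1, h2]
          cases ha : PySem.List.index? (xs.drop (i+1)) "l" <;>
            cases hb : PySem.List.index? (xs.drop (i+1)) "r" <;>
            simp [Nat.add_comm, Nat.add_left_comm]
    · have hd : xs.drop i = ([] : List String) := List.drop_eq_nil_of_le (by omega)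
      rw [solutionGo, dif_neg h, solutionGoSpec, hd]
      simp [PySem.List.index?_eq_idxOf?]

lemma index?_lt_length {xs : List String} {v : String} {k : Nat}
    (h : PySem.List.index? xs v = some k) : k < xs.length := by
  obtain ⟨hk, -, -⟩ := PySem.List.getElem_of_index?_eq_some h
  exact hk

-- ===== VERDICT (by name: the statement is the Claim_ definition above) =====
theorem solution_spec : Claim_equal_solution := by
  intro xs _
  unfold Spec_solution solution solution_alt
  rw [solutionGo_eq_spec xs xs.length 0 (by omega), solutionGoSpec, List.drop_zero]
  cases hl : PySem.List.index? xs "l" with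
  | none =>
    cases hr : PySem.List.index? xs "r" with
    | none => simp
    | some b =>
      have hb := index?_lt_length hr
      simp only [Option.getD_none, Option.getD_some]
      rw [if_neg (by omega), if_neg (by omega)]
      have hc : ((b : Int) + 1) = ((b + 1 : Nat) : Int) := by push_cast; ring
      rw [hc, PySem.List.slice_from_natCast]
      simp
  | some a =>
    have ha := index?_lt_length hl
    cases hr : PySem.List.index? xs "r" with
    | none =>
      simp only [Option.getD_none, Option.getD_some]
      rw [if_neg (by omega), if_pos (by omega), PySem.List.slice_to_natCast]
      simp
    | some b =>
      have hb := index?_lt_length hr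
      simp only [Option.getD_some]
      by_cases hab : a < b
      · rw [if_pos hab, if_neg (by omega), if_pos hab, PySem.List.slice_to_natCast]
        simp
      · rw [if_neg hab, if_neg (by omega), if_neg hab]
        have hc : ((b : Int) + 1) = ((b + 1 : Nat) : Int) := by push_cast; ring
        rw [hc, PySem.List.slice_from_natCast]
        simp
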